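-- pv_equiv track=rewrite | github.com/loganchoi/Programming-Languages-and-Translators | 1. Lexical Analyzer State Machine/lexer.py | char_lit
-- ===== SOURCE A (Python) =====
-- def char_lit(case):
--     lang = ['0','1','2','3','4','5','6','7','8','9','A','B','C','D','E']
--     end = ['X']
--     count = 0
--     state = 0
--
--     for s in case:
--         if state == 0:
--             if s in lang:
--                 count += 1
--                 state = 1
--             else:
--                 return False
--         elif state == 1:
--             if s in lang:
--                 count +=1
--                 state = 1
--             elif s in end:
--                 count +=1
--                 state = 2
--             else:
--                 return False
--         elif state == 2:
--             return False
--
--     if count == 3 and state == 2: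
--         return True
--     else:
--         return False
-- ===== SOURCE B (Python) =====
-- def char_lit(case):
--     lang = ['0','1','2','3','4','5','6','7','8','9','A','B','C','D','E']
--     return len(case) == 3 and case[0] in lang and case[1] in lang and case[2] == 'X'
-- ===== Notes on version B (the rewrite author's own statement) =====
-- stated objective: simpler
-- what changed: Replaced the counter/state-machine loop with a single closed-form boolean: length exactly 3, first two characters in the 0-9/A-E alphabet, then the single end-marker character.
import Mathlib
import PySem

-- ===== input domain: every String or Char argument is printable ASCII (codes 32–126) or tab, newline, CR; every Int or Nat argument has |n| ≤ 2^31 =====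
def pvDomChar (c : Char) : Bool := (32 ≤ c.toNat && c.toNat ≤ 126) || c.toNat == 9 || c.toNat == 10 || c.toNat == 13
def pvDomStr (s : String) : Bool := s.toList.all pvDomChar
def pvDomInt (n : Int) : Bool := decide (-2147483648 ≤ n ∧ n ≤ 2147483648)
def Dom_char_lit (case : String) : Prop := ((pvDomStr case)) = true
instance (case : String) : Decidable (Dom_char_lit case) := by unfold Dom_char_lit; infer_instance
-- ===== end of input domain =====

-- B replaces A's counter/state-machine loop by a closed-form boolean (length 3, two alphabet chars, then 'X'); objective: simpler.

-- ===== PORT A =====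
def charLitLang : List Char := ['0','1','2','3','4','5','6','7','8','9','A','B','C','D','E']
def charLitEnd : List Char := ['X']

-- the `for s in case` loop with early `return False`, carrying (count, state)
def charLitLoop : List Char → Int → Int → Bool
  | [], count, state => count == 3 && state == 2
  | s :: rest, count, state =>
    if state == 0 then
      if charLitLang.contains s then charLitLoop rest (count + 1) 1
      else false
    else if state == 1 then
      if charLitLang.contains s then charLitLoop rest (count + 1) 1
      else if charLitEnd.contains s then charLitLoop rest (count + 1) 2
      else false
    else if state == 2 then false
    else charLitLoop rest count state

def char_lit (case : String) : Bool := charLitLoop case.toList 0 0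

-- ===== PORT B =====
def char_lit_alt (case : String) : Bool :=
  PySem.Str.len case == 3 &&
  ((PySem.Str.pyGet? case 0).elim false charLitLang.contains) &&
  ((PySem.Str.pyGet? case 1).elim false charLitLang.contains) &&
  ((PySem.Str.pyGet? case 2).elim false (· == 'X'))

-- ===== PRECONDITION & SPEC =====
def Spec_char_lit (case : String) (out : Bool) : Prop := out = char_lit_alt case
instance (case : String) (out : Bool) : Decidable (Spec_char_lit case out) := by unfold Spec_char_lit; infer_instance

-- ===== CLAIM (what is proved, stated in full; the proofs are below) =====
def Claim_equal_char_lit : Prop := ∀ (case : String), Dom_char_lit case → Spec_char_lit case (char_lit case)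

-- ===== LEMMAS AND PROOFS =====

-- if the loop returns true, every remaining character incremented count, so count + length = 3
theorem charLitLoop_true_len (cs : List Char) : ∀ (count state : Int),
    state = 0 ∨ state = 1 ∨ state = 2 →
    charLitLoop cs count state = true → count + cs.length = 3 := by
  induction cs with
  | nil =>
    intro count state _ h
    simp [charLitLoop] at h
    simp [h.1]
  | cons s rest ih =>
    intro count state hs h
    unfold charLitLoop at h
    rcases hs with rfl | rfl | rfl
    · norm_num at h
      have := ih _ _ (by norm_num) h.2
      simp only [List.length_cons]; push_cast; omega
    · norm_num at h
      split_ifs at h with hmem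
      · have := ih _ _ (by norm_num) h
        simp only [List.length_cons]; push_cast; omega
      · have := ih _ _ (by norm_num) h.2
        simp only [List.length_cons]; push_cast; omega
    · norm_num at h

theorem char_lit_alt_toList (case : String) :
    char_lit_alt case =
      (((case.toList.length : Int) == 3) &&
       (case.toList[0]?.elim false charLitLang.contains) &&
       (case.toList[1]?.elim false charLitLang.contains) &&
       (case.toList[2]?.elim false (· == 'X'))) := by
  unfold char_lit_alt
  rw [PySem.Str.len_eq]
  simp only [PySem.Str.pyGet?_eq, PySem.Chars.pyGet?_eq_listPyGet?]
  simp only [PySem.List.pyGet?_of_nonneg _ (by norm_num : (0:Int) ≤ 0),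
      PySem.List.pyGet?_of_nonneg _ (by norm_num : (0:Int) ≤ 1),
      PySem.List.pyGet?_of_nonneg _ (by norm_num : (0:Int) ≤ 2)]
  norm_num
  rfl

theorem char_lit_eq (case : String) : char_lit case = char_lit_alt case := by
  rw [char_lit_alt_toList]
  unfold char_lit
  match case.toList with
  | [] => decide
  | [a] =>
    simp only [charLitLoop]
    split_ifs <;> simp
  | [a, b] =>
    by_cases ha : charLitLang.contains a = true <;>
    by_cases hb : charLitLang.contains b = true <;>
    by_cases hbx : b = 'X' <;>
      simp_all [charLitLoop, charLitEnd, show ¬ ('X' ∈ charLitLang) by decide]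
  | [a, b, c] =>
    by_cases ha : charLitLang.contains a = true <;>
    by_cases hb : charLitLang.contains b = true <;>
    by_cases hbx : b = 'X' <;>
    by_cases hc : charLitLang.contains c = true <;>
    by_cases hcx : c = 'X' <;>
      simp_all [charLitLoop, charLitEnd, show ¬ ('X' ∈ charLitLang) by decide]
  | a :: b :: c :: d :: rest =>
    have hlen : (((a :: b :: c :: d :: rest).length : Int) == 3) = false := by
      simp only [List.length_cons]
      rw [beq_eq_false_iff_ne]
      push_cast
      omega
    rw [hlen]
    simp only [Bool.false_and]
    cases hv : charLitLoop (a :: b :: c :: d :: rest) 0 0 with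
    | false => rfl
    | true =>
      have := charLitLoop_true_len _ 0 0 (by norm_num) hv
      simp only [List.length_cons] at this
      push_cast at this
      omega

-- ===== VERDICT (by name: the statement is the Claim_ definition above) =====
theorem char_lit_spec : Claim_equal_char_lit := by
  intro case _
  unfold Spec_char_lit
  exact char_lit_eq case
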